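-- pv_equiv track=rewrite | github.com/mdbruffey/adventofcode | 2016/Day-20/solve.py | part2
-- ===== SOURCE A (Python) =====
-- def part2(ranges):
--     ranges.sort(key=lambda x: x[0])
--     upper = 0
--     allowed = []
--     for i in range(len(ranges)-1):
--         b = ranges[i][1]
--         if b > upper:
--             upper = b
--         if upper+1 < ranges[i+1][0]:
--             allowed.extend(range(upper+1, ranges[i+1][0]))
--     return len(allowed)
-- ===== SOURCE B (Python) =====
-- def part2(ranges):
--     srt = sorted(ranges, key=lambda x: x[0])
--     ceilings = [0]
--     for r in srt[:-1]:
--         ceilings.append(max(ceilings[-1], r[1]))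
--     return sum(max(0, r[0] - c - 1) for r, c in zip(srt[1:], ceilings[1:]))
-- ===== Notes on version B (the rewrite author's own statement) =====
-- stated objective: alternative
-- what changed: B replaces A's single stateful sweep that materialises every allowed IP in a list with two staged passes: first build the list of prefix maxima of the range ends (the coverage ceiling before each range), then sum the clamped gap sizes max(0, start - ceiling - 1) by a zip comprehension, with no branch and no allowed-values list.
import Mathlib
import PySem

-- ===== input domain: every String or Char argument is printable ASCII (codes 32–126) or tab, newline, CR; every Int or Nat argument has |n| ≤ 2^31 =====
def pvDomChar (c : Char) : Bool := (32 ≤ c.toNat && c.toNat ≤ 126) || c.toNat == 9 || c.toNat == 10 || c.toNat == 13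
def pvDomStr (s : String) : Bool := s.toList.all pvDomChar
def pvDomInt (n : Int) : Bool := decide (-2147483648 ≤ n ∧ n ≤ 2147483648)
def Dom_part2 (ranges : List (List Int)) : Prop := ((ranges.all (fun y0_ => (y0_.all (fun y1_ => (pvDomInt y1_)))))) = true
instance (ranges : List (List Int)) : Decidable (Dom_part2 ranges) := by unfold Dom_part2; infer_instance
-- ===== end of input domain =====

-- B precomputes the list of prefix maxima of the range ends and then sums the clamped gap
-- sizes by a zip comprehension, instead of A's stateful sweep materialising every allowed
-- value in a list (objective: alternative). A sorts its argument in place; B does not —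
-- the equivalence proved here is about the return value only.

-- ===== PORT A =====
-- A's loop body for index i: b = ranges[i][1]; update upper; extend allowed by range(...)
def part2Step (s : List (List Int)) (st : Int × List Int) (i : Int) : Int × List Int :=
  let b := PySem.List.pyGetD (PySem.List.pyGetD s i []) 1 0
  let upper := if b > st.1 then b else st.1
  if upper + 1 < PySem.List.pyGetD (PySem.List.pyGetD s (i + 1) []) 0 0 then
    (upper, st.2 ++ PySem.List.pyRange (upper + 1)
              (PySem.List.pyGetD (PySem.List.pyGetD s (i + 1) []) 0 0))
  else (upper, st.2)

def part2 (ranges : List (List Int)) : Int :=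
  let s := PySem.List.sorted ranges (fun x => PySem.List.pyGetD x 0 0)
  let st := (PySem.List.pyRange 0 ((s.length : Int) - 1)).foldl (part2Step s) (0, [])
  (st.2.length : Int)

-- ===== PORT B =====
-- B's first pass: ceilings.append(max(ceilings[-1], r[1]))
def part2AltCeilStep (c : List Int) (r : List Int) : List Int :=
  c ++ [max (PySem.List.pyGetD c (-1) 0) (PySem.List.pyGetD r 1 0)]

def part2_alt (ranges : List (List Int)) : Int :=
  let srt := PySem.List.sorted ranges (fun x => PySem.List.pyGetD x 0 0)
  let ceilings := (PySem.List.slice srt none (some (-1))).foldl part2AltCeilStep [0]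
  (((PySem.List.slice srt (some 1) none).zip (PySem.List.slice ceilings (some 1) none)).map
      (fun rc => max 0 (PySem.List.pyGetD rc.1 0 0 - rc.2 - 1))).sum

-- ===== PRECONDITION & SPEC =====
-- Pre_ excludes exactly the inputs on which the Python A raises IndexError: those with an
-- empty sub-list (the sort key x[0]) or a one-element sub-list anywhere but in the last
-- position of the sorted list (ranges[i][1] is read for every i except the last).
def Pre_part2 (ranges : List (List Int)) : Prop :=
  (∀ r ∈ ranges, r ≠ []) ∧
  (∀ r ∈ (PySem.List.sorted ranges (fun x => PySem.List.pyGetD x 0 0)).dropLast, 2 ≤ r.length)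
instance (ranges : List (List Int)) : Decidable (Pre_part2 ranges) := by unfold Pre_part2; infer_instance
def pvWitness_part2 : List (List Int) := [[5, 8], [0, 2], [11, 12]]
def Spec_part2 (ranges : List (List Int)) (out : Int) : Prop := out = part2_alt ranges
instance (ranges : List (List Int)) (out : Int) : Decidable (Spec_part2 ranges out) := by unfold Spec_part2; infer_instance

-- ===== CLAIM (what is proved, stated in full; the proofs are below) =====
def Claim_equal_part2 : Prop := ∀ (ranges : List (List Int)), Dom_part2 ranges → Pre_part2 ranges → Spec_part2 ranges (part2 ranges)

-- ===== LEMMAS AND PROOFS =====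

-- the common recursive description of the gap sum: running ceiling u, adjacent pairs
def gapsFrom (u : Int) : List (List Int) → Int
  | [] => 0
  | [_] => 0
  | p :: q :: t =>
      let u' := max u (PySem.List.pyGetD p 1 0)
      max 0 (PySem.List.pyGetD q 0 0 - u' - 1) + gapsFrom u' (q :: t)

-- A's step recast on an adjacent pair of values instead of an index
def stepA (st : Int × List Int) (pq : List Int × List Int) : Int × List Int :=
  let b := PySem.List.pyGetD pq.1 1 0
  let upper := if b > st.1 then b else st.1
  if upper + 1 < PySem.List.pyGetD pq.2 0 0 then
    (upper, st.2 ++ PySem.List.pyRange (upper + 1) (PySem.List.pyGetD pq.2 0 0))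
  else (upper, st.2)

-- Index fold over range(len(s)-1) accessing s[j], s[j+1] = fold over adjacent pairs.
theorem foldl_idx_zip {σ : Type} (g : σ → List Int × List Int → σ) :
    ∀ (s : List (List Int)) (init : σ),
      (List.range (s.length - 1)).foldl
        (fun st j => g st (s.getD j [], s.getD (j + 1) [])) init
      = (s.zip s.tail).foldl g init := by
  intro s
  induction s with
  | nil => intro init; simp
  | cons a t ih =>
    intro init
    cases t with
    | nil => simp
    | cons b r =>
      have hlen : (a :: b :: r).length - 1 = (b :: r).length - 1 + 1 := by simp
      rw [hlen, List.range_succ_eq_map, List.foldl_cons, List.foldl_map]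
      simp only [Nat.succ_eq_add_one, List.getD_cons_succ, List.getD_cons_zero,
        List.zip_cons_cons, List.tail_cons, List.foldl_cons]
      exact ih (g init (a, b))

-- A's indexed step equals stepA on the pair of accessed elements.
theorem part2Step_eq (s : List (List Int)) (st : Int × List Int) (k : Nat) :
    part2Step s st ((k : Int)) = stepA st (s.getD k [], s.getD (k + 1) []) := by
  have h1 : ((k : Int) + 1) = (((k + 1 : Nat) : Int)) := by push_cast; ring
  simp only [part2Step, stepA, h1, PySem.List.pyGetD_natCast]

-- A's pair sweep: the allowed list grows by exactly the clamped gap sizes of gapsFrom.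
theorem stepA_fold_length :
    ∀ (l : List (List Int)) (u : Int) (acc : List Int),
      (((l.zip l.tail).foldl stepA (u, acc)).2.length : Int)
        = (acc.length : Int) + gapsFrom u l := by
  intro l
  induction l with
  | nil => intro u acc; simp [gapsFrom]
  | cons p t ih =>
    intro u acc
    cases t with
    | nil => simp [gapsFrom]
    | cons q r =>
      simp only [List.zip_cons_cons, List.tail_cons, List.foldl_cons]
      have hstep : stepA (u, acc) (p, q)
          = (max u (PySem.List.pyGetD p 1 0),
             acc ++ PySem.List.pyRange (max u (PySem.List.pyGetD p 1 0) + 1)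
                      (PySem.List.pyGetD q 0 0)) ∨
          stepA (u, acc) (p, q) = (max u (PySem.List.pyGetD p 1 0), acc) := by
        simp only [stepA]
        by_cases h : max u (PySem.List.pyGetD p 1 0) + 1 < PySem.List.pyGetD q 0 0
        · left
          have : (if PySem.List.pyGetD p 1 0 > u then PySem.List.pyGetD p 1 0 else u)
              = max u (PySem.List.pyGetD p 1 0) := by omega
          rw [this, if_pos h]
        · right
          have : (if PySem.List.pyGetD p 1 0 > u then PySem.List.pyGetD p 1 0 else u)
              = max u (PySem.List.pyGetD p 1 0) := by omega
          rw [this, if_neg h]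
      have hzip : (q :: r).zip ((q :: r).tail) = (q :: r).zip r := rfl
      set u' := max u (PySem.List.pyGetD p 1 0) with hu'
      by_cases h : u' + 1 < PySem.List.pyGetD q 0 0
      · have hA : stepA (u, acc) (p, q)
            = (u', acc ++ PySem.List.pyRange (u' + 1) (PySem.List.pyGetD q 0 0)) := by
          rcases hstep with h1 | h1
          · exact h1
          · exfalso
            have := congrArg Prod.fst h1
            simp only [stepA] at h1
            rw [show (if PySem.List.pyGetD p 1 0 > u then PySem.List.pyGetD p 1 0 else u)
                  = u' by omega, if_pos h] at h1
            have := congrArg Prod.snd h1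
            simp only at this
            have hlen := congrArg List.length this
            simp [PySem.List.length_pyRange_one] at hlen
            omega
        rw [hA, ← hzip, ih]
        have hlen : ((acc ++ PySem.List.pyRange (u' + 1) (PySem.List.pyGetD q 0 0)).length : Int)
            = (acc.length : Int) + (PySem.List.pyGetD q 0 0 - u' - 1) := by
          have := PySem.List.length_pyRange_one (u' + 1) (PySem.List.pyGetD q 0 0)
          simp only [List.length_append, this]
          omega
        rw [hlen]
        simp only [gapsFrom, ← hu']
        omega
      · have hA : stepA (u, acc) (p, q) = (u', acc) := by
          simp only [stepA]
          rw [show (if PySem.List.pyGetD p 1 0 > u then PySem.List.pyGetD p 1 0 else u)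
                = u' by omega, if_neg h]
        rw [hA, ← hzip, ih]
        simp only [gapsFrom, ← hu']
        omega

-- B's first pass: the ceilings fold builds exactly the prefix-maxima list.
def pmax (u : Int) : List (List Int) → List Int
  | [] => []
  | r :: t =>
      let u' := max u (PySem.List.pyGetD r 1 0)
      u' :: pmax u' t

theorem ceil_fold_eq :
    ∀ (l : List (List Int)) (acc : List Int) (u : Int),
      l.foldl part2AltCeilStep (acc ++ [u]) = (acc ++ [u]) ++ pmax u l := by
  intro l
  induction l with
  | nil => intro acc u; simp [pmax]
  | cons r t ih =>
    intro acc u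
    simp only [List.foldl_cons, pmax]
    have hstep : part2AltCeilStep (acc ++ [u]) r
        = (acc ++ [u]) ++ [max u (PySem.List.pyGetD r 1 0)] := by
      simp [part2AltCeilStep, PySem.List.pyGetD_neg_one_append_singleton]
    rw [hstep, ih ((acc ++ [u])) (max u (PySem.List.pyGetD r 1 0))]
    simp

-- B's second pass over the prefix maxima computes gapsFrom.
theorem zip_pmax_sum :
    ∀ (l : List (List Int)) (u : Int),
      ((l.tail.zip (pmax u l.dropLast)).map
          (fun rc => max 0 (PySem.List.pyGetD rc.1 0 0 - rc.2 - 1))).sum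
        = gapsFrom u l := by
  intro l
  induction l with
  | nil => intro u; simp [gapsFrom]
  | cons p t ih =>
    intro u
    cases t with
    | nil => simp [gapsFrom, pmax]
    | cons q r =>
      have hdl : (p :: q :: r).dropLast = p :: (q :: r).dropLast := by
        simp [List.dropLast]
      rw [List.tail_cons, hdl]
      simp only [pmax, List.zip_cons_cons, List.map_cons, List.sum_cons, gapsFrom]
      have hih := ih (max u (PySem.List.pyGetD p 1 0))
      simp only [List.tail_cons] at hih
      rw [hih]

-- ===== VERDICT (by name: the statement is the Claim_ definition above) =====
theorem part2_spec : Claim_equal_part2 := by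
  intro ranges _ _
  unfold Spec_part2 part2 part2_alt
  set s := PySem.List.sorted ranges (fun x => PySem.List.pyGetD x 0 0) with hs
  simp only []
  rw [PySem.List.slice_from_one, PySem.List.slice_to_neg_one]
  have hceil : (s.dropLast).foldl part2AltCeilStep [0] = (0 : Int) :: pmax 0 s.dropLast := by
    have h := ceil_fold_eq s.dropLast [] 0
    simpa using h
  rw [hceil, PySem.List.slice_from_one, List.tail_cons, zip_pmax_sum s 0]
  rcases s with _ | ⟨a, t⟩
  · simp [gapsFrom]
  · have hb : (((a :: t).length : Int) - 1) = ((t.length : Nat) : Int) := by simp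
    rw [hb, PySem.List.pyRange_zero_natCast, List.foldl_map]
    have hfun : (fun (st : Int × List Int) (k : Nat) => part2Step (a :: t) st ((k : Int)))
        = fun st k => stepA st ((a :: t).getD k [], (a :: t).getD (k + 1) []) := by
      funext st k; exact part2Step_eq (a :: t) st k
    rw [hfun]
    have hlen : t.length = (a :: t).length - 1 := rfl
    rw [hlen, foldl_idx_zip stepA (a :: t) (0, [])]
    have h := stepA_fold_length (a :: t) 0 []
    simp only [List.length_nil, Nat.cast_zero, Int.zero_add] at h
    exact h
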